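-- pv_equiv track=rewrite | github.com/danielmr6/FIB-Criptografia | P2/DeliverableP2/ex2.py | GF_es_generador
-- ===== SOURCE A (Python) =====
-- def GF_product_p(a: int, b: int):
--     """
--     Computes the product of a and b in finite field GF(2**8)
--     """
--
--     res = 0
--     while b > 0:
--         if b % 2 != 0:
--             res = res ^ a
--         a <<= 1
--         if a > 0xff:
--             a = a ^ m
--         b >>= 1
--     return res
--
-- def GF_es_generador(a: int):
--     """
--     Returns wether the integer a is generator of the field GF(2**8) or not
--     """
--     if a == 0:
--         return False
--     res = 1
--     for i in range(1, 256):
--         res = GF_product_p(res, a)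
--         if res == 1:
--             if i == 255:
--                 return True
--             else:
--                 return False
--     return False
--
-- m = 395
-- ===== SOURCE B (Python) =====
-- def GF_product_p(a: int, b: int):
--     """
--     Computes the product of a and b in finite field GF(2**8)
--     """
--     res = 0
--     while b > 0:
--         if b % 2 != 0:
--             res = res ^ a
--         a <<= 1
--         if a > 0xff:
--             a = a ^ m
--         b >>= 1
--     return res
--
-- def GF_power(base: int, exp: int):
--     """base**exp in GF(2**8) by square-and-multiply"""
--     res = 1
--     while exp > 0:
--         if exp % 2 == 1:
--             res = GF_product_p(res, base)
--         base = GF_product_p(base, base)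
--         exp >>= 1
--     return res
--
-- def GF_es_generador(a: int):
--     """
--     Returns wether the integer a is generator of the field GF(2**8) or not
--     """
--     e = GF_product_p(1, a)
--     if e == 0:
--         return False
--     # e generates iff e^(order/p) != 1 for each prime factor p of the group order
--     return GF_power(e, 85) != 1 and GF_power(e, 51) != 1 and GF_power(e, 15) != 1
--
-- m = 395
-- ===== Notes on version B (the rewrite author's own statement) =====
-- stated objective: faster
-- what changed: B first reduces a to its GF(2^8) representative e = GF_product_p(1, a) and then decides generatorhood with three square-and-multiply exponentiations, one per prime factor of the multiplicative group order, instead of A's full step-by-step multiplicative order scan.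
import Mathlib
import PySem

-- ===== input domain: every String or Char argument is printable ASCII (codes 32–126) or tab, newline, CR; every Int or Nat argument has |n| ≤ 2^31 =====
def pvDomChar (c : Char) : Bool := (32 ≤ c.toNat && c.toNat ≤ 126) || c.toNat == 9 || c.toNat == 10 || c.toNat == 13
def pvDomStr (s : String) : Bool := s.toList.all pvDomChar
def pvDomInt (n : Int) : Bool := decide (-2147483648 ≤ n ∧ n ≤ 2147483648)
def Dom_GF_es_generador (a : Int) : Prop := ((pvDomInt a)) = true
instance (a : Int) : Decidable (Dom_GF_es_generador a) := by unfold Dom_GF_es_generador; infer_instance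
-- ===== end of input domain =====

-- B replaces A's step-by-step multiplicative order scan by three square-and-multiply
-- exponentiations, one per prime factor of the multiplicative group order.

-- ===== PORT A =====
-- while-loop of GF_product_p; Python's 'res ^ a' is PySem.Int.bxor, 'b >>= 1' is floor division
def gfProdLoop (a b res : Int) : Int :=
  if 0 < b then
    let res' := if PySem.Int.mod b 2 ≠ 0 then PySem.Int.bxor res a else res
    let a' := a * 2
    let a'' := if 255 < a' then PySem.Int.bxor a' 395 else a'
    gfProdLoop a'' (PySem.Int.floordiv b 2) res'
  else res
termination_by b.toNat
decreasing_by
  rw [PySem.Int.floordiv_eq_ediv_of_pos (by omega)]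
  omega

def GF_product_p (a b : Int) : Int := gfProdLoop a b 0

-- the 'for i in range(1, 256)' loop with its early returns
def gfScan (a res : Int) (i : Nat) : Bool :=
  if i ≤ 255 then
    let res' := GF_product_p res a
    if res' = 1 then i == 255 else gfScan a res' (i + 1)
  else false
termination_by 256 - i

def GF_es_generador (a : Int) : Bool :=
  if a = 0 then false else gfScan a 1 1

-- ===== PORT B =====
-- square-and-multiply loop of GF_power
def gfPowLoop (base exp res : Int) : Int :=
  if 0 < exp then
    let res' := if PySem.Int.mod exp 2 = 1 then GF_product_p res base else res
    let base' := GF_product_p base base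
    gfPowLoop base' (PySem.Int.floordiv exp 2) res'
  else res
termination_by exp.toNat
decreasing_by
  rw [PySem.Int.floordiv_eq_ediv_of_pos (by omega)]
  omega

def GF_power (base exp : Int) : Int := gfPowLoop base exp 1

def GF_es_generador_alt (a : Int) : Bool :=
  let e := GF_product_p 1 a
  if e = 0 then false
  else (GF_power e 85 != 1) && (GF_power e 51 != 1) && (GF_power e 15 != 1)

-- ===== PRECONDITION & SPEC =====
def Spec_GF_es_generador (a : Int) (out : Bool) : Prop := out = GF_es_generador_alt a
instance (a : Int) (out : Bool) : Decidable (Spec_GF_es_generador a out) := by unfold Spec_GF_es_generador; infer_instance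

-- ===== CLAIM (what is proved, stated in full; the proofs are below) =====
def Claim_equal_GF_es_generador : Prop := ∀ (a : Int), Dom_GF_es_generador a → Spec_GF_es_generador a (GF_es_generador a)

-- ===== LEMMAS AND PROOFS =====

-- Nat model of the GF(2^8) arithmetic (used only by the proofs)
def pvS (a : Nat) : Nat := if 255 < a * 2 then (a * 2) ^^^ 395 else a * 2

-- fuelled carry-less product: pvP f a b = a·b in GF(2^8) (a kept reduced), valid for b < 2^f
def pvP : Nat → Nat → Nat → Nat
  | 0, _, _ => 0
  | f+1, a, b => if 0 < b then (if b % 2 ≠ 0 then a else 0) ^^^ pvP f (pvS a) (b / 2) else 0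

-- Nat model of A's scan, k = remaining iterations (k = 256 - i)
def pvScan (e : Nat) : Nat → Nat → Bool
  | _, 0 => false
  | r, k+1 => if pvP 8 r e = 1 then k == 0 else pvScan e (pvP 8 r e) k

-- Nat model of B's square-and-multiply
def pvPow : Nat → Nat → Nat → Nat → Nat
  | 0, _, _, res => res
  | f+1, base, exp, res =>
      if 0 < exp then
        pvPow f (pvP 8 base base) (exp / 2) (if exp % 2 = 1 then pvP 8 res base else res)
      else res

set_option maxRecDepth 100000 in
theorem pvS_lt_fin : ∀ a : Fin 256, pvS a.val < 256 := by decide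

theorem pvS_lt {a : Nat} (h : a < 256) : pvS a < 256 := pvS_lt_fin ⟨a, h⟩

theorem pvP_zero (f a : Nat) : pvP f a 0 = 0 := by cases f <;> simp [pvP]

theorem pvP_lt : ∀ (f a b : Nat), a < 256 → pvP f a b < 256 := by
  intro f
  induction f with
  | zero => intro a b ha; simp [pvP]
  | succ f ih =>
    intro a b ha
    simp only [pvP]
    split
    · have h1 : (if b % 2 ≠ 0 then a else 0) < 2^8 := by split <;> simp <;> omega
      have h2 : pvP f (pvS a) (b / 2) < 2^8 := by simpa using ih (pvS a) (b / 2) (pvS_lt ha)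
      simpa using Nat.xor_lt_two_pow h1 h2
    · omega

theorem pvP_fuel : ∀ (f g a b : Nat), b < 2^f → b < 2^g → pvP f a b = pvP g a b := by
  intro f
  induction f with
  | zero =>
    intro g a b hf _
    have : b = 0 := by simpa using hf
    subst this
    rw [pvP_zero, pvP_zero]
  | succ f ih =>
    intro g a b hf hg
    rcases Nat.eq_zero_or_pos b with hb | hb
    · subst hb; rw [pvP_zero, pvP_zero]
    · cases g with
      | zero => omega
      | succ g =>
        simp only [pvP, if_pos hb]
        congr 1
        apply ih
        · have := Nat.pow_succ 2 f ▸ hf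
          omega
        · have := Nat.pow_succ 2 g ▸ hg
          omega

theorem pvP_lin : ∀ (f a b c : Nat), b < 2^f → c < 2^f → pvP f a (b ^^^ c) = pvP f a b ^^^ pvP f a c := by
  intro f
  induction f with
  | zero =>
    intro a b c hb hc
    have hb0 : b = 0 := by simpa using hb
    have hc0 : c = 0 := by simpa using hc
    subst hb0; subst hc0
    simp [pvP]
  | succ f ih =>
    intro a b c hb hc
    rcases Nat.eq_zero_or_pos b with hb0 | hbpos
    · subst hb0; simp [pvP_zero]
    rcases Nat.eq_zero_or_pos c with hc0 | hcpos
    · subst hc0; simp [pvP_zero]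
    rcases Nat.eq_zero_or_pos (b ^^^ c) with hbc0 | hbcpos
    · have hbc : b = c := by
        have h1 : c = b ^^^ (b ^^^ c) := by
          rw [← Nat.xor_assoc, Nat.xor_self, Nat.zero_xor]
        rw [h1, hbc0, Nat.xor_zero]
      subst hbc
      rw [hbc0, pvP_zero, Nat.xor_self]
    · simp only [pvP, if_pos hbpos, if_pos hcpos, if_pos hbcpos]
      rw [Nat.xor_div_two]
      rw [ih (pvS a) (b / 2) (c / 2)
          (by have := Nat.pow_succ 2 f ▸ hb; omega)
          (by have := Nat.pow_succ 2 f ▸ hc; omega)]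
      have hmod : (b ^^^ c) % 2 = (b + c) % 2 := Nat.xor_mod_two_eq
      rcases Nat.mod_two_eq_zero_or_one b with h1 | h1 <;>
        rcases Nat.mod_two_eq_zero_or_one c with h2 | h2 <;>
        · have h3 : (b ^^^ c) % 2 = (b + c) % 2 := Nat.xor_mod_two_eq
          have h4 : (b + c) % 2 = (b % 2 + c % 2) % 2 := by omega
          rw [h3, h4, h1, h2]
          simp [Nat.xor_assoc, Nat.xor_comm, Nat.xor_left_comm]
  
theorem pvP_dbl (f a q : Nat) : pvP (f+1) a (2 * q) = pvP f (pvS a) q := by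
  rcases Nat.eq_zero_or_pos q with hq | hq
  · subst hq; simp [pvP_zero]
  · simp only [pvP]
    rw [if_pos (by omega)]
    have h1 : 2 * q % 2 = 0 := by omega
    have h2 : 2 * q / 2 = q := by omega
    simp [h1, h2]

set_option maxRecDepth 100000 in
theorem pvP_two_fin : ∀ e : Fin 256, pvP 8 2 e.val = pvS e.val := by decide

set_option maxRecDepth 100000 in
theorem pvP_m_fin : ∀ r : Fin 256, pvP 9 r.val 395 = 0 := by decide

-- multiplying a reduced r by the raw double 2e equals multiplying by the reduced double pvS e
theorem pvP_red2 {r e : Nat} (hr : r < 256) (he : e < 256) :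
    pvP 9 r (2 * e) = pvP 8 r (pvS e) := by
  by_cases h : 255 < e * 2
  · have hSe : pvS e = e * 2 ^^^ 395 := by simp [pvS, h]
    have h2e : 2 * e = pvS e ^^^ 395 := by
      rw [hSe, Nat.xor_assoc, Nat.xor_self, Nat.xor_zero]; omega
    rw [h2e, pvP_lin 9 r _ 395 (by have := pvS_lt he; omega) (by norm_num),
        pvP_m_fin ⟨r, hr⟩, Nat.xor_zero]
    exact pvP_fuel 9 8 r (pvS e) (by have := pvS_lt he; omega) (pvS_lt he)
  · have hSe : pvS e = e * 2 := by simp [pvS, h]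
    rw [show 2 * e = pvS e by omega]
    exact pvP_fuel 9 8 r (pvS e) (by omega) (by omega)

theorem pvP_succ (f a b : Nat) (hb : 0 < b) :
    pvP (f+1) a b = (if b % 2 ≠ 0 then a else 0) ^^^ pvP f (pvS a) (b / 2) := by
  conv_lhs => rw [pvP]
  rw [if_pos hb]

theorem pvP8_one (a : Nat) : pvP 8 a 1 = a := by simp [pvP]

-- x·(2e) = x·(reduced 2e): shifting the second factor equals pvS on it
theorem pvP_Sstep {r e : Nat} (hr : r < 256) (he : e < 256) :
    pvP 8 (pvS r) e = pvP 8 r (pvS e) := by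
  have h1 : pvP 9 r (2 * e) = pvP 8 (pvS r) e := pvP_dbl 8 r e
  rw [← h1, pvP_red2 hr he]

-- the homomorphism: multiplying a reduced r by any b equals multiplying by b's reduction pvP f 1 b
theorem pvP_hom : ∀ (f b r : Nat), r < 256 → b < 2^f → pvP f r b = pvP 8 r (pvP f 1 b) := by
  intro f
  induction f with
  | zero =>
    intro b r _ hb
    have : b = 0 := by simpa using hb
    subst this
    simp [pvP_zero]
  | succ f ih =>
    intro b r hr hb
    rcases Nat.eq_zero_or_pos b with hb0 | hbpos
    · subst hb0; simp [pvP_zero]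
    have hq : b / 2 < 2^f := by have := Nat.pow_succ 2 f ▸ hb; omega
    have heq : pvP f 1 (b / 2) < 256 := pvP_lt f 1 (b / 2) (by norm_num)
    have hS1 : pvS 1 = 2 := by norm_num [pvS]
    have h1 : pvP (f+1) r b = (if b % 2 ≠ 0 then r else 0) ^^^ pvP 8 r (pvS (pvP f 1 (b / 2))) := by
      rw [pvP_succ f r b hbpos, ih (b / 2) (pvS r) (pvS_lt hr) hq, pvP_Sstep hr heq]
    have h2 : pvP (f+1) 1 b = (if b % 2 ≠ 0 then 1 else 0) ^^^ pvS (pvP f 1 (b / 2)) := by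
      rw [pvP_succ f 1 b hbpos, hS1, ih (b / 2) 2 (by norm_num) hq]
      congr 1
      exact pvP_two_fin ⟨_, heq⟩
    rw [h1, h2,
      pvP_lin 8 r (if b % 2 ≠ 0 then 1 else 0) (pvS (pvP f 1 (b / 2)))
        (by split <;> norm_num) (by have := pvS_lt heq; omega)]
    congr 1
    split
    · exact (pvP8_one r).symm
    · exact (pvP_zero 8 r).symm

-- ===== the per-element equivalence of A's scan and B's three exponent checks =====
set_option maxRecDepth 1000000 in
set_option maxHeartbeats 4000000 in
theorem pvFinal : ∀ e : Fin 256,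
    pvScan e.val 1 255 =
      (decide (e.val ≠ 0) && (pvPow 7 e.val 85 1 != 1) && (pvPow 7 e.val 51 1 != 1) &&
        (pvPow 7 e.val 15 1 != 1)) := by decide

-- ===== bridges from the Int ports to the Nat model =====
theorem prodBridge : ∀ (f a b res : Nat), b < 2^f →
    gfProdLoop (a : Int) (b : Int) (res : Int) = ((res ^^^ pvP f a b : Nat) : Int) := by
  intro f
  induction f with
  | zero =>
    intro a b res hb
    have : b = 0 := by simpa using hb
    subst this
    rw [gfProdLoop]
    simp [pvP]
  | succ f ih =>
    intro a b res hb
    rcases Nat.eq_zero_or_pos b with hb0 | hbpos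
    · subst hb0
      rw [gfProdLoop]
      simp [pvP_zero]
    · have hmod : PySem.Int.mod (b : Int) 2 = ((b % 2 : Nat) : Int) := by
        rw [PySem.Int.mod_eq_emod_of_pos (by norm_num)]
        omega
      have hcond : (PySem.Int.mod (b : Int) 2 ≠ 0) ↔ (b % 2 ≠ 0) := by rw [hmod]; omega
      have hres : (if PySem.Int.mod (b : Int) 2 ≠ 0 then PySem.Int.bxor (res : Int) (a : Int) else (res : Int))
          = (((if b % 2 ≠ 0 then res ^^^ a else res : Nat)) : Int) := by
        by_cases h : b % 2 ≠ 0
        · rw [if_pos (hcond.mpr h), if_pos h, PySem.Int.bxor_natCast]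
        · rw [if_neg (fun hh => h (hcond.mp hh)), if_neg h]
      have haa : (if 255 < (a : Int) * 2 then PySem.Int.bxor ((a : Int) * 2) 395 else (a : Int) * 2)
          = ((pvS a : Nat) : Int) := by
        have ha2 : ((a : Int) * 2) = ((a * 2 : Nat) : Int) := by push_cast; ring
        rw [ha2]
        by_cases h : 255 < a * 2
        · rw [if_pos (by exact_mod_cast h)]
          have h395 : (395 : Int) = ((395 : Nat) : Int) := by norm_num
          rw [h395, PySem.Int.bxor_natCast]
          simp [pvS, h]
        · rw [if_neg (by exact_mod_cast h)]
          simp [pvS, h]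
      have hdiv : PySem.Int.floordiv (b : Int) 2 = ((b / 2 : Nat) : Int) := by
        rw [PySem.Int.floordiv_eq_ediv_of_pos (by norm_num)]
        omega
      rw [gfProdLoop, if_pos (by exact_mod_cast hbpos)]
      show gfProdLoop
          (if 255 < (a : Int) * 2 then PySem.Int.bxor ((a : Int) * 2) 395 else (a : Int) * 2)
          (PySem.Int.floordiv (b : Int) 2)
          (if PySem.Int.mod (b : Int) 2 ≠ 0 then PySem.Int.bxor (res : Int) (a : Int) else (res : Int))
          = ((res ^^^ pvP (f+1) a b : Nat) : Int)
      rw [hres, haa, hdiv, ih (pvS a) (b / 2) _ (by have := Nat.pow_succ 2 f ▸ hb; omega)]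
      congr 1
      rw [pvP_succ f a b hbpos]
      by_cases h : b % 2 = 0 <;> simp [h, Nat.xor_assoc]

theorem prod_eq (f a b : Nat) (hb : b < 2^f) :
    GF_product_p (a : Int) (b : Int) = ((pvP f a b : Nat) : Int) := by
  have h := prodBridge f a b 0 hb
  simpa [GF_product_p] using h

theorem prod_nonpos (r b : Int) (hb : b ≤ 0) : GF_product_p r b = 0 := by
  rw [GF_product_p, gfProdLoop, if_neg (by omega)]

theorem scanDead (a : Int) (ha : a ≤ 0) : ∀ (k i : Nat) (r : Int), i + k = 256 → gfScan a r i = false := by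
  intro k
  induction k with
  | zero =>
    intro i r hik
    rw [gfScan, if_neg (by omega)]
  | succ k ih =>
    intro i r hik
    rw [gfScan, if_pos (by omega)]
    simp only [prod_nonpos _ a ha]
    rw [if_neg (by norm_num)]
    exact ih (i + 1) 0 (by omega)

theorem scanBridge (a : Int) (ha : 0 < a) (hA : a.toNat < 2^32) :
    ∀ (k i r : Nat), i + k = 256 → r < 256 →
      gfScan a (r : Int) i = pvScan (pvP 32 1 a.toNat) r k := by
  intro k
  induction k with
  | zero =>
    intro i r hik hr
    rw [gfScan, if_neg (by omega)]
    rfl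
  | succ k ih =>
    intro i r hik hr
    have hcast : a = ((a.toNat : Nat) : Int) := by omega
    have hp : GF_product_p (r : Int) a = ((pvP 8 r (pvP 32 1 a.toNat) : Nat) : Int) := by
      calc GF_product_p (r : Int) a = GF_product_p (r : Int) ((a.toNat : Nat) : Int) := by rw [← hcast]
        _ = ((pvP 32 r a.toNat : Nat) : Int) := prod_eq 32 r a.toNat hA
        _ = ((pvP 8 r (pvP 32 1 a.toNat) : Nat) : Int) := by rw [pvP_hom 32 a.toNat r hr hA]
    rw [gfScan, if_pos (by omega)]
    simp only [hp]
    have hlt : pvP 8 r (pvP 32 1 a.toNat) < 256 := pvP_lt 8 r _ hr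
    by_cases h1 : pvP 8 r (pvP 32 1 a.toNat) = 1
    · rw [if_pos (by exact_mod_cast h1)]
      show (i == 255) = pvScan (pvP 32 1 a.toNat) r (k+1)
      rw [show pvScan (pvP 32 1 a.toNat) r (k+1) = (k == 0) by simp [pvScan, h1]]
      rcases Nat.eq_zero_or_pos k with hk | hk
      · subst hk
        have : i = 255 := by omega
        simp [this]
      · have h255 : i ≠ 255 := by omega
        have hk0 : k ≠ 0 := by omega
        simp [h255, hk0]
    · rw [if_neg (by exact_mod_cast h1)]
      rw [ih (i + 1) _ (by omega) hlt]
      conv_rhs => rw [pvScan]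
      rw [if_neg h1]

theorem powBridge : ∀ (f base exp res : Nat), base < 256 → exp < 2^f →
    gfPowLoop (base : Int) (exp : Int) (res : Int) = ((pvPow f base exp res : Nat) : Int) := by
  intro f
  induction f with
  | zero =>
    intro base exp res hb he
    have : exp = 0 := by simpa using he
    subst this
    rw [gfPowLoop]
    simp [pvPow]
  | succ f ih =>
    intro base exp res hb he
    rcases Nat.eq_zero_or_pos exp with he0 | hepos
    · subst he0
      rw [gfPowLoop]
      simp [pvPow]
    · rw [gfPowLoop, if_pos (by exact_mod_cast hepos)]
      have hmod : PySem.Int.mod (exp : Int) 2 = ((exp % 2 : Nat) : Int) := by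
        rw [PySem.Int.mod_eq_emod_of_pos (by norm_num)]
        omega
      have hres : (if PySem.Int.mod (exp : Int) 2 = 1 then GF_product_p (res : Int) (base : Int) else (res : Int))
          = (((if exp % 2 = 1 then pvP 8 res base else res : Nat)) : Int) := by
        rw [hmod, prod_eq 8 res base (by omega)]
        by_cases h : exp % 2 = 1
        · rw [if_pos (by exact_mod_cast h), if_pos h]
        · rw [if_neg (by exact_mod_cast h), if_neg h]
      have hbase : GF_product_p (base : Int) (base : Int) = ((pvP 8 base base : Nat) : Int) :=
        prod_eq 8 base base (by omega)
      have hdiv : PySem.Int.floordiv (exp : Int) 2 = ((exp / 2 : Nat) : Int) := by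
        rw [PySem.Int.floordiv_eq_ediv_of_pos (by norm_num)]
        omega
      show gfPowLoop (GF_product_p (base : Int) (base : Int)) (PySem.Int.floordiv (exp : Int) 2)
          (if PySem.Int.mod (exp : Int) 2 = 1 then GF_product_p (res : Int) (base : Int) else (res : Int))
          = ((pvPow (f+1) base exp res : Nat) : Int)
      rw [hres, hbase, hdiv,
        ih (pvP 8 base base) (exp / 2) _ (pvP_lt 8 base base hb)
          (by have := Nat.pow_succ 2 f ▸ he; omega)]
      congr 1
      conv_rhs => rw [pvPow]
      rw [if_pos hepos]

theorem bne_cast (x : Nat) : (((x : Nat) : Int) != 1) = (x != 1) := by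
  by_cases h : x = 1
  · subst h; decide
  · have hx : ((x : Nat) : Int) ≠ 1 := by exact_mod_cast h
    rw [bne_iff_ne.mpr hx, bne_iff_ne.mpr h]

-- ===== VERDICT (by name: the statement is the Claim_ definition above) =====
theorem GF_es_generador_spec : Claim_equal_GF_es_generador := by
  intro a hdom
  unfold Spec_GF_es_generador
  unfold Dom_GF_es_generador pvDomInt at hdom
  have hbound : -2147483648 ≤ a ∧ a ≤ 2147483648 := by simpa using hdom
  by_cases ha : a ≤ 0
  · have hB : GF_es_generador_alt a = false := by
      simp [GF_es_generador_alt, prod_nonpos _ a ha]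
    rw [hB]
    by_cases h0 : a = 0
    · simp [GF_es_generador, h0]
    · rw [GF_es_generador, if_neg h0]
      exact scanDead a ha 255 1 1 rfl
  · replace ha : 0 < a := by omega
    have hA32 : a.toNat < 2^32 := by norm_num; omega
    set eN := pvP 32 1 a.toNat with heNdef
    have heN : eN < 256 := pvP_lt 32 1 a.toNat (by norm_num)
    have hcast : a = ((a.toNat : Nat) : Int) := by omega
    have hE : GF_product_p 1 a = ((eN : Nat) : Int) := by
      rw [show (1 : Int) = ((1 : Nat) : Int) by norm_num, hcast]
      exact prod_eq 32 1 a.toNat hA32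
    have hAside : GF_es_generador a = pvScan eN 1 255 := by
      rw [GF_es_generador, if_neg (by omega)]
      rw [show (1 : Int) = ((1 : Nat) : Int) by norm_num]
      exact scanBridge a ha hA32 255 1 1 rfl (by norm_num)
    have hpow : ∀ k : Nat, k < 2^7 → GF_power ((eN : Nat) : Int) (k : Int) = ((pvPow 7 eN k 1 : Nat) : Int) := by
      intro k hk
      rw [GF_power, show (1 : Int) = ((1 : Nat) : Int) by norm_num]
      exact powBridge 7 eN k 1 heN hk
    have hfin : pvScan eN 1 255 =
        (decide (eN ≠ 0) && (pvPow 7 eN 85 1 != 1) && (pvPow 7 eN 51 1 != 1) &&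
          (pvPow 7 eN 15 1 != 1)) := pvFinal ⟨eN, heN⟩
    rw [hAside, hfin]
    show _ = GF_es_generador_alt a
    rw [GF_es_generador_alt]
    show _ = (if GF_product_p 1 a = 0 then false
      else ((GF_power (GF_product_p 1 a) 85 != 1) && (GF_power (GF_product_p 1 a) 51 != 1) &&
        (GF_power (GF_product_p 1 a) 15 != 1)))
    rw [hE]
    by_cases h0 : eN = 0
    · rw [h0, if_pos (by norm_num)]
      rw [show decide ((0 : Nat) ≠ 0) = false from rfl, Bool.false_and, Bool.false_and,
        Bool.false_and]
    · rw [if_neg (by exact_mod_cast h0)]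
      rw [show (85 : Int) = ((85 : Nat) : Int) from by norm_num,
          show (51 : Int) = ((51 : Nat) : Int) from by norm_num,
          show (15 : Int) = ((15 : Nat) : Int) from by norm_num,
          hpow 85 (by norm_num), hpow 51 (by norm_num), hpow 15 (by norm_num),
          bne_cast, bne_cast, bne_cast, decide_eq_true h0, Bool.true_and]
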